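-- pv_equiv track=rewrite | github.com/dongor2448/sts_to_xlsx | sts_util/load_sts_df.py | elite_taken
-- ===== SOURCE A (Python) =====
-- def elite_taken(path_list, act):
--     count = 0
--     max_floor = len(path_list)
--     if act == 1:
--         if max_floor <= 16:
--             for floor in range(max_floor):
--                 if path_list[floor] == "E":
--                     count += 1
--         else:
--             for floor in range(16):
--                 if path_list[floor] == "E":
--                     count += 1
--     if act == 2:
--         if max_floor <= 32:
--             for floor in range(16, max_floor):
--                 if path_list[floor] == "E":
--                     count += 1
--         else:
--             for floor in range(16, 32):
--                 if path_list[floor] == "E":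
--                     count += 1
--     if act == 3:
--         if max_floor <= 49:
--             for floor in range(32, max_floor):
--                 if path_list[floor] == "E":
--                     count += 1
--         else:
--             for floor in range(32, 49):
--                 if path_list[floor] == "E":
--                     count += 1
--     return count
-- ===== SOURCE B (Python) =====
-- def elite_taken(path_list, act):
--     # One classification pass over the whole path: each floor is mapped to the
--     # act it belongs to, and we count 'E' rooms whose floor's act matches.
--     count = 0
--     for floor, room in enumerate(path_list):
--         if floor < 16:
--             room_act = 1
--         elif floor < 32:
--             room_act = 2
--         elif floor < 49:
--             room_act = 3
--         else:
--             room_act = None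
--         if room_act == act and room == "E":
--             count += 1
--     return count
-- ===== Notes on version B (the rewrite author's own statement) =====
-- stated objective: alternative
-- what changed: Instead of selecting an act-specific index window and looping only over it with nested length guards, B makes a single classification pass over the whole path: each floor is mapped to the act it belongs to (1/2/3/None) and 'E' rooms whose floor classification equals the requested act are counted.
import Mathlib
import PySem

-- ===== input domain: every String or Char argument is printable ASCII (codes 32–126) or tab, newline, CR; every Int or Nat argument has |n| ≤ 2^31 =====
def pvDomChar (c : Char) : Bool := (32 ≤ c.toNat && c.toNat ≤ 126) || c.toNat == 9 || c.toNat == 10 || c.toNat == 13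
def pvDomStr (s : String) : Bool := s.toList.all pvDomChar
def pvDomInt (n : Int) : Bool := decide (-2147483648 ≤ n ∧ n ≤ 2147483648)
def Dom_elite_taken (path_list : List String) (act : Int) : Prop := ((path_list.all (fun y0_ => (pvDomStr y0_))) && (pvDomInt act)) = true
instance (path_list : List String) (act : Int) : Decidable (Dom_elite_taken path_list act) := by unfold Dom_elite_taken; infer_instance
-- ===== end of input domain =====

-- B replaces A's act-selected window loops by one whole-list classification pass (objective: alternative).

-- ===== PORT A =====
-- path_list[floor] is ported as pyGetD with a dummy default: every index A uses is in
-- range (the loop bound is ≤ len(path_list)), so this is exact.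
def elite_taken (path_list : List String) (act : Int) : Int :=
  let count : Int := 0
  let max_floor : Int := path_list.length
  let count :=
    if act == 1 then
      if max_floor ≤ 16 then
        (PySem.List.pyRange 0 max_floor 1).foldl
          (fun count floor => if PySem.List.pyGetD path_list floor "" == "E" then count + 1 else count) count
      else
        (PySem.List.pyRange 0 16 1).foldl
          (fun count floor => if PySem.List.pyGetD path_list floor "" == "E" then count + 1 else count) count
    else count
  let count :=
    if act == 2 then
      if max_floor ≤ 32 then
        (PySem.List.pyRange 16 max_floor 1).foldl
          (fun count floor => if PySem.List.pyGetD path_list floor "" == "E" then count + 1 else count) count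
      else
        (PySem.List.pyRange 16 32 1).foldl
          (fun count floor => if PySem.List.pyGetD path_list floor "" == "E" then count + 1 else count) count
    else count
  let count :=
    if act == 3 then
      if max_floor ≤ 49 then
        (PySem.List.pyRange 32 max_floor 1).foldl
          (fun count floor => if PySem.List.pyGetD path_list floor "" == "E" then count + 1 else count) count
      else
        (PySem.List.pyRange 32 49 1).foldl
          (fun count floor => if PySem.List.pyGetD path_list floor "" == "E" then count + 1 else count) count
    else count
  count

-- ===== PORT B =====
-- the if/elif/else classification of a floor index into its act (None → Option.none)
def actOfFloor (floor : Int) : Option Int :=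
  if floor < 16 then some 1
  else if floor < 32 then some 2
  else if floor < 49 then some 3
  else none

def elite_taken_alt (path_list : List String) (act : Int) : Int :=
  (PySem.List.enumerate path_list).foldl
    (fun count p => if actOfFloor p.1 == some act && p.2 == "E" then count + 1 else count) 0

-- ===== PRECONDITION & SPEC =====
def Spec_elite_taken (path_list : List String) (act : Int) (out : Int) : Prop := out = elite_taken_alt path_list act
instance (path_list : List String) (act : Int) (out : Int) : Decidable (Spec_elite_taken path_list act out) := by unfold Spec_elite_taken; infer_instance

-- ===== CLAIM (what is proved, stated in full; the proofs are below) =====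
def Claim_equal_elite_taken : Prop := ∀ (path_list : List String) (act : Int), Dom_elite_taken path_list act → Spec_elite_taken path_list act (elite_taken path_list act)

-- ===== LEMMAS AND PROOFS =====

-- B's counting fold does nothing on a stretch of floors that classify to a different act
theorem countB_false (xs : List String) (a : Int) (l : List Int) (c : Int)
    (h : ∀ j ∈ l, ¬ actOfFloor j = some a) :
    l.foldl (fun count j =>
        if actOfFloor j = some a ∧ PySem.List.pyGetD xs j "" = "E" then count + 1 else count) c
      = c := by
  induction l generalizing c with
  | nil => rfl
  | cons x xs' ih =>
    rw [List.foldl_cons, if_neg (fun hc : actOfFloor x = some a ∧ PySem.List.pyGetD xs x "" = "E" =>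
      h x (by simp) hc.1)]
    exact ih c (fun y hy => h y (by simp [hy]))

-- on a stretch of floors that all classify to act a, B's counting fold is A's
theorem countB_eq_countA (xs : List String) (a : Int) (l : List Int) (c : Int)
    (h : ∀ j ∈ l, actOfFloor j = some a) :
    l.foldl (fun count j =>
        if actOfFloor j = some a ∧ PySem.List.pyGetD xs j "" = "E" then count + 1 else count) c
      = l.foldl (fun count floor =>
          if PySem.List.pyGetD xs floor "" = "E" then count + 1 else count) c := by
  induction l generalizing c with
  | nil => rfl
  | cons x xs' ih =>
    rw [List.foldl_cons, List.foldl_cons,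
      if_congr (show (actOfFloor x = some a ∧ PySem.List.pyGetD xs x "" = "E")
          ↔ PySem.List.pyGetD xs x "" = "E" from by simp [h x (by simp)]) rfl rfl]
    exact ih _ (fun y hy => h y (by simp [hy]))

-- B rewritten as a counting fold over range(0, len)
theorem alt_as_range (path_list : List String) (act : Int) :
    elite_taken_alt path_list act
      = (PySem.List.pyRange 0 (path_list.length : Int) 1).foldl
          (fun count j =>
            if actOfFloor j = some act ∧ PySem.List.pyGetD path_list j "" = "E"
            then count + 1 else count) 0 := by
  unfold elite_taken_alt
  rw [PySem.List.enumerate_eq_map_pyRange (d := "")]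
  rw [List.foldl_map]
  simp [PySem.List.len_eq]

theorem actOfFloor_lt16 (j : Int) (h : j < 16) : actOfFloor j = some 1 := by
  unfold actOfFloor; rw [if_pos h]

theorem actOfFloor_mid (j : Int) (h0 : 16 ≤ j) (h : j < 32) : actOfFloor j = some 2 := by
  unfold actOfFloor; rw [if_neg (by omega), if_pos h]

theorem actOfFloor_hi (j : Int) (h0 : 32 ≤ j) (h : j < 49) : actOfFloor j = some 3 := by
  unfold actOfFloor; rw [if_neg (by omega), if_neg (by omega), if_pos h]

theorem actOfFloor_ne (j : Int) (act : Int)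
    (h1 : ¬act = 1) (h2 : ¬act = 2) (h3 : ¬act = 3) : ¬ actOfFloor j = some act := by
  unfold actOfFloor; split_ifs <;> simp <;> omega

theorem actOfFloor_ne_of_window (j a : Int)
    (h : a = 1 ∧ 16 ≤ j ∨ a = 2 ∧ (j < 16 ∨ 32 ≤ j) ∨ a = 3 ∧ (j < 32 ∨ 49 ≤ j)) :
    ¬ actOfFloor j = some a := by
  unfold actOfFloor; split_ifs <;> simp <;> omega

theorem elite_taken_spec' (path_list : List String) (act : Int) :
    elite_taken path_list act = elite_taken_alt path_list act := by
  rw [alt_as_range]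
  unfold elite_taken
  simp only [beq_iff_eq]
  by_cases h1 : act = 1
  · subst h1
    simp only [if_true, if_neg (show ¬(1 : Int) = 2 by decide),
      if_neg (show ¬(1 : Int) = 3 by decide)]
    by_cases hle : (path_list.length : Int) ≤ 16
    · rw [if_pos hle]
      rw [countB_eq_countA path_list 1 _ 0 (fun j hj => by
        rw [PySem.List.mem_pyRange_one] at hj
        exact actOfFloor_lt16 j (by omega))]
    · rw [if_neg hle]
      rw [PySem.List.pyRange_one_append 0 16 (path_list.length : Int) (by omega) (by omega),
        List.foldl_append,
        countB_eq_countA path_list 1 (PySem.List.pyRange 0 16 1) 0 (fun j hj => by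
          rw [PySem.List.mem_pyRange_one] at hj
          exact actOfFloor_lt16 j hj.2),
        countB_false path_list 1 (PySem.List.pyRange 16 (path_list.length : Int) 1) _
          (fun j hj => by
            rw [PySem.List.mem_pyRange_one] at hj
            exact actOfFloor_ne_of_window j 1 (by omega))]
  · by_cases h2 : act = 2
    · subst h2
      simp only [if_true, if_neg (show ¬(2 : Int) = 1 by decide),
        if_neg (show ¬(2 : Int) = 3 by decide)]
      by_cases hlo : (path_list.length : Int) ≤ 16
      · rw [if_pos (show (path_list.length : Int) ≤ 32 by omega), PySem.List.pyRange_one_eq_nil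
            (show (path_list.length : Int) ≤ 16 from hlo)]
        simp only [List.foldl_nil]
        rw [countB_false path_list 2 _ 0 (fun j hj => by
          rw [PySem.List.mem_pyRange_one] at hj
          exact actOfFloor_ne_of_window j 2 (by omega))]
      · rw [PySem.List.pyRange_one_append 0 16 (path_list.length : Int) (by omega) (by omega),
          List.foldl_append,
          countB_false path_list 2 (PySem.List.pyRange 0 16 1) 0 (fun j hj => by
            rw [PySem.List.mem_pyRange_one] at hj
            exact actOfFloor_ne_of_window j 2 (by omega))]
        by_cases hle : (path_list.length : Int) ≤ 32
        · rw [if_pos hle]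
          rw [countB_eq_countA path_list 2 _ 0 (fun j hj => by
            rw [PySem.List.mem_pyRange_one] at hj
            exact actOfFloor_mid j hj.1 (by omega))]
        · rw [if_neg hle]
          rw [PySem.List.pyRange_one_append 16 32 (path_list.length : Int) (by omega) (by omega),
            List.foldl_append,
            countB_eq_countA path_list 2 (PySem.List.pyRange 16 32 1) 0 (fun j hj => by
              rw [PySem.List.mem_pyRange_one] at hj
              exact actOfFloor_mid j hj.1 hj.2),
            countB_false path_list 2 (PySem.List.pyRange 32 (path_list.length : Int) 1) _
              (fun j hj => by
                rw [PySem.List.mem_pyRange_one] at hj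
                exact actOfFloor_ne_of_window j 2 (by omega))]
    · by_cases h3 : act = 3
      · subst h3
        simp only [if_true, if_neg (show ¬(3 : Int) = 1 by decide),
          if_neg (show ¬(3 : Int) = 2 by decide)]
        by_cases hlo : (path_list.length : Int) ≤ 32
        · rw [if_pos (show (path_list.length : Int) ≤ 49 by omega), PySem.List.pyRange_one_eq_nil
              (show (path_list.length : Int) ≤ 32 from hlo)]
          simp only [List.foldl_nil]
          rw [countB_false path_list 3 _ 0 (fun j hj => by
            rw [PySem.List.mem_pyRange_one] at hj
            exact actOfFloor_ne_of_window j 3 (by omega))]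
        · rw [PySem.List.pyRange_one_append 0 32 (path_list.length : Int) (by omega) (by omega),
            List.foldl_append,
            countB_false path_list 3 (PySem.List.pyRange 0 32 1) 0 (fun j hj => by
              rw [PySem.List.mem_pyRange_one] at hj
              exact actOfFloor_ne_of_window j 3 (by omega))]
          by_cases hle : (path_list.length : Int) ≤ 49
          · rw [if_pos hle]
            rw [countB_eq_countA path_list 3 _ 0 (fun j hj => by
              rw [PySem.List.mem_pyRange_one] at hj
              exact actOfFloor_hi j hj.1 (by omega))]
          · rw [if_neg hle]
            rw [PySem.List.pyRange_one_append 32 49 (path_list.length : Int) (by omega) (by omega),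
              List.foldl_append,
              countB_eq_countA path_list 3 (PySem.List.pyRange 32 49 1) 0 (fun j hj => by
                rw [PySem.List.mem_pyRange_one] at hj
                exact actOfFloor_hi j hj.1 hj.2),
              countB_false path_list 3 (PySem.List.pyRange 49 (path_list.length : Int) 1) _
                (fun j hj => by
                  rw [PySem.List.mem_pyRange_one] at hj
                  exact actOfFloor_ne_of_window j 3 (by omega))]
      · -- act matches no branch of A and no floor classification of B
        rw [if_neg h1, if_neg h2, if_neg h3]
        rw [countB_false path_list act _ 0 (fun j _ => actOfFloor_ne j act h1 h2 h3)]

-- ===== VERDICT (by name: the statement is the Claim_ definition above) =====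
theorem elite_taken_spec : Claim_equal_elite_taken := by
  intro path_list act _
  unfold Spec_elite_taken
  exact elite_taken_spec' path_list act
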